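-- pv_equiv track=rewrite | github.com/JustinLi3/Scents_n_Notes | test2.py | adjacent_counts
-- ===== SOURCE A (Python) =====
-- def adjacent_counts(words):
--     results = [0 for _ in words]
--     for index in range(len(words)):
--         temp = 0
--         for index2 in range(len(words[index])-1):
--             if(words[index][index2+1] == words[index][index2]):
--                 temp+=1
--             results[index] = temp
--     return results
-- ===== SOURCE B (Python) =====
-- from itertools import groupby
--
-- def adjacent_counts(words):
--     # For each word, partition it into maximal runs of equal characters;
--     # a run of length L contributes L-1 adjacent equal pairs.
--     return [sum(sum(1 for _ in g) - 1 for _, g in groupby(word)) for word in words]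
-- ===== Notes on version B (the rewrite author's own statement) =====
-- stated objective: idiomatic
-- what changed: Replaces the index-based double loop with mutation of a preallocated results list by a comprehension that groups each word into maximal runs of equal characters (itertools.groupby) and sums run-length minus one per run.
import Mathlib
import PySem

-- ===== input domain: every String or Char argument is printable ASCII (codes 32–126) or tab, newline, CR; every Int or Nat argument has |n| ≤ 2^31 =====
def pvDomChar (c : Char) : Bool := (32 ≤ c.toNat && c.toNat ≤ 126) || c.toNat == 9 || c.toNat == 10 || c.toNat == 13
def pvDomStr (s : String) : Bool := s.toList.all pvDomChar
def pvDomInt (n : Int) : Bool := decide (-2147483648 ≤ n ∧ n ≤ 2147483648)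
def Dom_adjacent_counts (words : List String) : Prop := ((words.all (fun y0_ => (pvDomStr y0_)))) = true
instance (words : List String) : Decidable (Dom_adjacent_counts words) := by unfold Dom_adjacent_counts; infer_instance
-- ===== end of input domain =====

-- B groups each word into maximal runs of equal characters and sums (run length - 1); idiomatic, same cost as A.

-- ===== PORT A =====
-- literal transliteration: results = [0 for _ in words]; outer loop over range(len(words)),
-- inner loop over range(len(word)-1) carrying temp and writing results[index] = temp each step.
-- indices produced by pyRange are nonnegative, so pyGetD / .toNat are exact here.
def adjacent_counts (words : List String) : List Int :=
  let results := words.map (fun _ => (0 : Int))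
  (PySem.List.pyRange 0 (words.length : Int) 1).foldl
    (fun results index =>
      let w := (PySem.List.pyGetD words index "").toList
      ((PySem.List.pyRange 0 ((w.length : Int) - 1) 1).foldl
        (fun (st : Int × List Int) index2 =>
          let temp :=
            if PySem.List.pyGetD w (index2 + 1) ' ' = PySem.List.pyGetD w index2 ' '
            then st.1 + 1 else st.1
          (temp, st.2.set index.toNat temp))
        (0, results)).2)
    results

-- ===== PORT B =====
-- groupby(word): the first run is the head plus takeWhile of equal chars; it contributes
-- its length minus one, i.e. (takeWhile (· == c) rest).length; recurse on the remaining runs.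
def pvRunCount : List Char → Int
  | [] => 0
  | c :: rest =>
      ((rest.takeWhile (· == c)).length : Int) + pvRunCount (rest.dropWhile (· == c))
termination_by l => l.length
decreasing_by
  simp only [List.length_cons]
  exact Nat.lt_succ_of_le (List.length_dropWhile_le _ _)

def adjacent_counts_alt (words : List String) : List Int :=
  words.map (fun word => pvRunCount word.toList)

-- ===== PRECONDITION & SPEC =====
def Spec_adjacent_counts (words : List String) (out : List Int) : Prop := out = adjacent_counts_alt words
instance (words : List String) (out : List Int) : Decidable (Spec_adjacent_counts words out) := by unfold Spec_adjacent_counts; infer_instance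

-- ===== CLAIM (what is proved, stated in full; the proofs are below) =====
def Claim_equal_adjacent_counts : Prop := ∀ (words : List String), Dom_adjacent_counts words → Spec_adjacent_counts words (adjacent_counts words)

-- ===== LEMMAS AND PROOFS =====

-- the mathematical count of adjacent equal pairs
def pvPairs : List Char → Int
  | [] => 0
  | [_] => 0
  | a :: b :: t => (if b = a then 1 else 0) + pvPairs (b :: t)

-- B computes pvPairs: peeling the first run off c :: rest counts pairs of c :: rest
theorem pvRun_pairs (rest : List Char) : ∀ (c : Char),
    ((rest.takeWhile (· == c)).length : Int) + pvPairs (rest.dropWhile (· == c))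
      = pvPairs (c :: rest) := by
  induction rest with
  | nil => intro c; simp [pvPairs]

  | cons b t ih =>
    intro c
    by_cases h : b = c
    · subst h
      simp only [List.takeWhile_cons, List.dropWhile_cons, beq_self_eq_true, if_true,
        List.length_cons, pvPairs]
      have := ih b
      push_cast
      omega
    · have hb : (b == c) = false := by simp [h]
      simp [hb, pvPairs, h]

theorem pvRunCount_eq_pairs (l : List Char) : pvRunCount l = pvPairs l := by
  induction l using pvRunCount.induct with
  | case1 => simp [pvRunCount, pvPairs]
  | case2 c rest ih =>
    rw [pvRunCount, ih, pvRun_pairs]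

-- A's inner loop, rephrased over Nat indices, computes pvPairs
theorem pvInner_nat (w : List Char) : ∀ (s : Int),
    (List.range (w.length - 1)).foldl
      (fun t k => if w.getD (k + 1) ' ' = w.getD k ' ' then t + 1 else t) s
      = s + pvPairs w := by
  induction w with
  | nil => intro s; simp [pvPairs]
  | cons a rest ih =>
    intro s
    match rest with
    | [] => simp [pvPairs]
    | b :: t =>
      have hr : (a :: b :: t : List Char).length - 1 = (t.length + 1) := by simp
      rw [hr, List.range_succ_eq_map, List.foldl_cons, List.foldl_map]
      have hstep : ∀ (s' : Int),
          (List.range t.length).foldl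
            (fun tl k => if (a :: b :: t : List Char).getD (Nat.succ k + 1) ' '
                            = (a :: b :: t : List Char).getD (Nat.succ k) ' '
                         then tl + 1 else tl) s'
          = (List.range ((b :: t : List Char).length - 1)).foldl
            (fun tl k => if (b :: t : List Char).getD (k + 1) ' '
                            = (b :: t : List Char).getD k ' '
                         then tl + 1 else tl) s' := by
        intro s'
        have hlen : (b :: t : List Char).length - 1 = t.length := by simp
        rw [hlen]
        apply PySem.List.foldl_congr_mem
        intro tl x _
        simp [Nat.succ_eq_add_one]
      rw [hstep, ih]
      have hg1 : (a :: b :: t : List Char).getD (0 + 1) ' ' = b := by simp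
      have hg0 : (a :: b :: t : List Char).getD 0 ' ' = a := by simp
      rw [hg1, hg0]
      simp only [pvPairs]
      split_ifs with h1 <;> omega

-- the inner fold of A: each step writes results[k]; the last write wins
theorem pvFold_set (g : Int → Int → Int) (k : Nat) (L : List Int) : ∀ (t : Int) (r : List Int),
    (L.foldl (fun (st : Int × List Int) i => (g st.1 i, st.2.set k (g st.1 i))) (t, r))
      = (L.foldl g t, if L = [] then r else r.set k (L.foldl g t)) := by
  induction L with
  | nil => intro t r; simp
  | cons i L ih =>
    intro t r
    simp only [List.foldl_cons]
    rw [ih]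
    rcases L with _ | ⟨j, L⟩
    · simp
    · simp [List.set_set]

-- target state of A's outer loop after processing the first n indices
def pvTgt (words : List String) (n : Nat) : List Int :=
  (words.take n).map (fun w => pvPairs w.toList)
    ++ (words.drop n).map (fun _ => (0 : Int))

theorem pvTgt_succ (words : List String) (n : Nat) (h : n < words.length) :
    pvTgt words (n + 1) = (pvTgt words n).set n (pvPairs (words[n].toList)) := by
  unfold pvTgt
  have hlen : ((words.take n).map (fun w => pvPairs w.toList)).length = n := by
    simp [Nat.le_of_lt h]
  rw [List.drop_eq_getElem_cons h, List.map_cons,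
    List.set_append_right _ _ (le_of_eq hlen), hlen, Nat.sub_self,
    List.take_add_one, List.getElem?_eq_getElem h]
  simp only [List.map_append, List.map_cons, List.map_nil, List.set_cons_zero,
    Option.toList_some, List.append_assoc, List.cons_append, List.nil_append]

theorem pvInner_int (w : List Char) :
    (PySem.List.pyRange 0 ((w.length : Int) - 1) 1).foldl
      (fun t i => if PySem.List.pyGetD w (i + 1) ' ' = PySem.List.pyGetD w i ' '
                  then t + 1 else t) 0
      = pvPairs w := by
  rcases w with _ | ⟨a, rest⟩
  · simp [pvPairs]
  · have hcast : ((a :: rest : List Char).length : Int) - 1 = (rest.length : Int) := by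
      simp
    rw [hcast, PySem.List.pyRange_zero_natCast, List.foldl_map]
    have := pvInner_nat (a :: rest) 0
    have hlen : (a :: rest : List Char).length - 1 = rest.length := by simp
    rw [hlen, zero_add] at this
    rw [← this]
    apply PySem.List.foldl_congr_mem
    intro t k _
    have h1 : ((k : Int) + 1) = ((k + 1 : Nat) : Int) := by push_cast; ring
    rw [h1, PySem.List.pyGetD_natCast, PySem.List.pyGetD_natCast]

theorem pvOuter (words : List String) : ∀ (n : Nat), n ≤ words.length →
    (PySem.List.pyRange 0 (n : Int) 1).foldl
      (fun results index =>
        let w := (PySem.List.pyGetD words index "").toList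
        ((PySem.List.pyRange 0 ((w.length : Int) - 1) 1).foldl
          (fun (st : Int × List Int) index2 =>
            let temp :=
              if PySem.List.pyGetD w (index2 + 1) ' ' = PySem.List.pyGetD w index2 ' '
              then st.1 + 1 else st.1
            (temp, st.2.set index.toNat temp))
          (0, results)).2)
      (pvTgt words 0)
      = pvTgt words n := by
  intro n
  induction n with
  | zero => intro _; simp
  | succ n ih =>
    intro hn
    have hn' : n < words.length := Nat.lt_of_succ_le hn
    have hsplit : PySem.List.pyRange 0 ((n + 1 : Nat) : Int) 1
        = PySem.List.pyRange 0 (n : Int) 1 ++ [(n : Int)] := by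
      have : ((n + 1 : Nat) : Int) = (n : Int) + 1 := by push_cast; ring
      rw [this, PySem.List.pyRange_one_succ_right (by positivity)]
    rw [hsplit, List.foldl_append, ih (le_of_lt hn'), List.foldl_cons, List.foldl_nil]
    simp only
    have hw : PySem.List.pyGetD words (n : Int) "" = words[n] := by
      rw [PySem.List.pyGetD_natCast]
      exact List.getD_eq_getElem _ _ hn'
    rw [hw]
    rw [pvFold_set (fun t i =>
        if PySem.List.pyGetD (words[n].toList) (i + 1) ' '
            = PySem.List.pyGetD (words[n].toList) i ' ' then t + 1 else t)]
    simp only [Int.toNat_natCast]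
    rw [pvInner_int]
    rw [pvTgt_succ words n hn']
    split_ifs with hemp
    · -- empty inner range: the word has at most one char, so pvPairs is 0 and results[n] is already 0
      have hlen1 : words[n].toList.length ≤ 1 := by
        by_contra hgt
        rw [Nat.not_le] at hgt
        have : (0 : Int) ∈ PySem.List.pyRange 0 ((words[n].toList.length : Int) - 1) 1 := by
          rw [PySem.List.mem_pyRange_one]
          omega
        rw [hemp] at this
        exact absurd this (List.not_mem_nil)
      have hp0 : pvPairs words[n].toList = 0 := by
        rcases hl : words[n].toList with _ | ⟨a, _ | ⟨b, t⟩⟩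
        · rfl
        · rfl
        · rw [hl] at hlen1; simp at hlen1
      rw [hp0]
      -- setting entry n of pvTgt words n to 0 changes nothing: that entry is 0
      unfold pvTgt
      have hlen : ((words.take n).map (fun w => pvPairs w.toList)).length = n := by
        simp [Nat.le_of_lt hn']
      rw [List.drop_eq_getElem_cons hn', List.map_cons,
        List.set_append_right _ _ (le_of_eq hlen), hlen, Nat.sub_self]
      simp
    · rfl

theorem pvA_eq (words : List String) :
    adjacent_counts words = words.map (fun w => pvPairs w.toList) := by
  unfold adjacent_counts
  have h0 : words.map (fun _ => (0 : Int)) = pvTgt words 0 := by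
    simp [pvTgt]
  simp only [h0]
  rw [pvOuter words words.length (le_refl _)]
  unfold pvTgt
  simp

-- ===== VERDICT (by name: the statement is the Claim_ definition above) =====
theorem adjacent_counts_spec : Claim_equal_adjacent_counts := by
  intro words _
  unfold Spec_adjacent_counts adjacent_counts_alt
  rw [pvA_eq]
  exact List.map_congr_left (fun w _ => (pvRunCount_eq_pairs w.toList).symm)
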